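-- pv_equiv track=rewrite | github.com/kyanchase/hw2 | cipher/cryptunknown.py | decrypt_with_keyword
-- ===== SOURCE A (Python) =====
-- alphabet = "ABCDEFGHIJKLMNOPQRSTUVWXYZ"
--
-- def decrypt_with_keyword(ciphertext, keyword):
--     plaintext = ""
--     j = 0  # Index in keyword
--     for char in ciphertext:
--         if char in alphabet:
--             c = alphabet.index(char)  # Ciphertext letter index
--             k = alphabet.index(keyword[j % len(keyword)])  # Keyword letter index
--             p = (c - k + len(alphabet)) % 26  # Decrypt using modulo 26
--             plaintext += alphabet[p]
--             j += 1
--         else: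
--             plaintext += char  # Non-letters copied directly
--     return plaintext
-- ===== SOURCE B (Python) =====
-- alphabet = "ABCDEFGHIJKLMNOPQRSTUVWXYZ"
--
-- def decrypt_with_keyword(ciphertext, keyword):
--     letters = [ch for ch in ciphertext if ch in alphabet]
--     decrypted = [alphabet[(alphabet.index(ch) - alphabet.index(keyword[i % len(keyword)])) % 26]
--                  for i, ch in enumerate(letters)]
--     it = iter(decrypted)
--     return "".join(next(it) if ch in alphabet else ch for ch in ciphertext)
-- ===== Notes on version B (the rewrite author's own statement) =====
-- stated objective: alternative
-- what changed: A's single inline loop with a keyword counter is replaced by a decrypt-then-reassemble decomposition: filter the letters, decrypt them via enumerate over the letter stream, then a second pass over the original text pulls decrypted letters from an iterator and copies non-letters.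
import Mathlib
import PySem

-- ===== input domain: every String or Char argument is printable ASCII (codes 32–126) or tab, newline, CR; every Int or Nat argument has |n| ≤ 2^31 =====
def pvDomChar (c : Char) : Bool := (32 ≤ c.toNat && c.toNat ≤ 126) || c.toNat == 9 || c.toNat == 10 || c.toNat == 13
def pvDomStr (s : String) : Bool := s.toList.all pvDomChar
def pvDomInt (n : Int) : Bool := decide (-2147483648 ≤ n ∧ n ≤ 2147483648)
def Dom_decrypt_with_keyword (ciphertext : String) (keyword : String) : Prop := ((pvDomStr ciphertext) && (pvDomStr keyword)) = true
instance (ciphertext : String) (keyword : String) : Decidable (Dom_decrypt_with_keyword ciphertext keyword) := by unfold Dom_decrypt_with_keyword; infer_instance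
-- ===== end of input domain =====

-- B changes the decomposition only: decrypt the filtered letter stream first, then reassemble; same cost, no speed claim.
-- alphabet = "ABCDEFGHIJKLMNOPQRSTUVWXYZ"
def pvAlph : List Char := "ABCDEFGHIJKLMNOPQRSTUVWXYZ".toList

-- ===== PORT A =====
-- literal port of A's loop; alphabet.index / keyword[j % len] are exact on Pre_ (where Python does not raise)
def decrypt_with_keyword (ciphertext : String) (keyword : String) : String :=
  let kwl := keyword.toList
  let r := ciphertext.toList.foldl (fun (st : List Char × Nat) char =>
    if char ∈ pvAlph then
      let c : Int := pvAlph.idxOf char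
      let k : Int := pvAlph.idxOf (kwl.getD (st.2 % kwl.length) ' ')
      let p := PySem.Int.mod (c - k + pvAlph.length) 26
      (st.1 ++ [pvAlph.getD p.toNat ' '], st.2 + 1)
    else (st.1 ++ [char], st.2)) ([], 0)
  String.ofList r.1

-- ===== PORT B =====
-- literal port of Source B: filter, decrypt with enumerate, then reassemble pulling from the decrypted list
def decrypt_with_keyword_alt (ciphertext : String) (keyword : String) : String :=
  let kwl := keyword.toList
  let letters := ciphertext.toList.filter (fun ch => ch ∈ pvAlph)
  let decrypted := (PySem.List.enumerate letters 0).map (fun p =>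
    pvAlph.getD (PySem.Int.mod ((pvAlph.idxOf p.2 : Int) -
      pvAlph.idxOf (kwl.getD (PySem.Int.mod p.1 (kwl.length : Int)).toNat ' ')) 26).toNat ' ')
  let r := ciphertext.toList.foldl (fun (st : List Char × List Char) ch =>
    if ch ∈ pvAlph then (st.1 ++ [st.2.headD ' '], st.2.tail)
    else (st.1 ++ [ch], st.2)) ([], decrypted)
  String.ofList r.1

-- ===== PRECONDITION & SPEC =====
-- Pre_ = exactly the inputs where Python A returns: if the ciphertext contains an uppercase letter,
-- the keyword is nonempty and every keyword position actually used (the first min(#letters, len) ones) is an uppercase letter.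
def Pre_decrypt_with_keyword (ciphertext : String) (keyword : String) : Prop :=
  (ciphertext.toList.filter (fun ch => ch ∈ pvAlph)) ≠ [] →
    (keyword ≠ "" ∧ ∀ i : Nat,
      i < min (ciphertext.toList.filter (fun ch => ch ∈ pvAlph)).length keyword.toList.length →
      keyword.toList.getD i ' ' ∈ pvAlph)
instance (ciphertext : String) (keyword : String) : Decidable (Pre_decrypt_with_keyword ciphertext keyword) := by unfold Pre_decrypt_with_keyword; infer_instance
def pvWitness_decrypt_with_keyword : String × String := ("HELLO, W0RLD!", "KEY")
def Spec_decrypt_with_keyword (ciphertext : String) (keyword : String) (out : String) : Prop := out = decrypt_with_keyword_alt ciphertext keyword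
instance (ciphertext : String) (keyword : String) (out : String) : Decidable (Spec_decrypt_with_keyword ciphertext keyword out) := by unfold Spec_decrypt_with_keyword; infer_instance

-- ===== CLAIM (what is proved, stated in full; the proofs are below) =====
def Claim_equal_decrypt_with_keyword : Prop := ∀ (ciphertext : String) (keyword : String), Dom_decrypt_with_keyword ciphertext keyword → Pre_decrypt_with_keyword ciphertext keyword → Spec_decrypt_with_keyword ciphertext keyword (decrypt_with_keyword ciphertext keyword)

-- ===== LEMMAS AND PROOFS =====

-- canonical per-letter decryption (B's formula at Nat counter j)
def pvDec (kwl : List Char) (j : Nat) (ch : Char) : Char :=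
  pvAlph.getD (PySem.Int.mod ((pvAlph.idxOf ch : Int) -
    pvAlph.idxOf (kwl.getD (PySem.Int.mod (j : Int) (kwl.length : Int)).toNat ' ')) 26).toNat ' '

-- reference result: what both programs compute, letter counter starting at j
def pvSpecRun (kwl : List Char) (j : Nat) : List Char → List Char
  | [] => []
  | ch :: cs =>
    if ch ∈ pvAlph then pvDec kwl j ch :: pvSpecRun kwl (j + 1) cs
    else ch :: pvSpecRun kwl j cs

-- the decrypted stream of B, indexed from j
def pvDecFrom (kwl : List Char) (j : Nat) : List Char → List Char
  | [] => []
  | ch :: cs => pvDec kwl j ch :: pvDecFrom kwl (j + 1) cs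

theorem pvModPos (a b : Int) (hb : 0 ≤ b) : PySem.Int.mod a b = a % b := by
  simp only [PySem.Int.mod]
  rw [Int.fmod_eq_emod]
  simp [hb]

theorem pvModNat (j len : Nat) : (PySem.Int.mod (j : Int) (len : Int)).toNat = j % len := by
  rw [pvModPos _ _ (by positivity)]
  omega

-- A's per-letter char equals pvDec
theorem pvDecA_eq (kwl : List Char) (j : Nat) (ch : Char) :
    pvAlph.getD (PySem.Int.mod ((pvAlph.idxOf ch : Int) -
      pvAlph.idxOf (kwl.getD (j % kwl.length) ' ') + pvAlph.length) 26).toNat ' ' = pvDec kwl j ch := by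
  unfold pvDec
  rw [pvModNat]
  congr 1
  have hl : (pvAlph.length : Int) = 26 := by decide
  rw [hl, pvModPos _ _ (by norm_num), pvModPos _ _ (by norm_num)]
  omega

-- A's fold computes pvSpecRun
theorem pvA_run (kwl : List Char) (cs : List Char) (acc : List Char) (j : Nat) :
    cs.foldl (fun (st : List Char × Nat) char =>
      if char ∈ pvAlph then
        (st.1 ++ [pvAlph.getD (PySem.Int.mod ((pvAlph.idxOf char : Int) -
          pvAlph.idxOf (kwl.getD (st.2 % kwl.length) ' ') + pvAlph.length) 26).toNat ' '], st.2 + 1)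
      else (st.1 ++ [char], st.2)) (acc, j)
    = (acc ++ pvSpecRun kwl j cs, j + (cs.filter (fun ch => ch ∈ pvAlph)).length) := by
  induction cs generalizing acc j with
  | nil => simp [pvSpecRun]
  | cons ch cs ih =>
    by_cases h : ch ∈ pvAlph
    · simp only [List.foldl_cons, if_pos h]
      rw [ih, pvDecA_eq]
      simp only [pvSpecRun, List.filter_cons, h, decide_true, if_true, List.length_cons]
      rw [Prod.mk.injEq]
      exact ⟨by simp, by omega⟩
    · simp only [List.foldl_cons, if_neg h]
      rw [ih]
      simp only [pvSpecRun, List.filter_cons, h, decide_false, if_false]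
      simp

-- B's enumerate-map equals pvDecFrom
theorem pvB_map (kwl : List Char) (ls : List Char) (s : Nat) :
    (PySem.List.enumerate ls (s : Int)).map (fun p =>
      pvAlph.getD (PySem.Int.mod ((pvAlph.idxOf p.2 : Int) -
        pvAlph.idxOf (kwl.getD (PySem.Int.mod p.1 (kwl.length : Int)).toNat ' ')) 26).toNat ' ')
    = pvDecFrom kwl s ls := by
  induction ls generalizing s with
  | nil => simp [pvDecFrom, PySem.List.enumerate_nil]
  | cons ch t ih =>
    rw [PySem.List.enumerate_cons]
    simp only [List.map_cons, pvDecFrom]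
    congr 1
    have : ((s : Int) + 1) = ((s + 1 : Nat) : Int) := by push_cast; ring
    rw [this, ih]

-- B's reassembly fold computes pvSpecRun
theorem pvB_run (kwl : List Char) (cs : List Char) (acc : List Char) (j : Nat) :
    (cs.foldl (fun (st : List Char × List Char) ch =>
      if ch ∈ pvAlph then (st.1 ++ [st.2.headD ' '], st.2.tail)
      else (st.1 ++ [ch], st.2)) (acc, pvDecFrom kwl j (cs.filter (fun ch => ch ∈ pvAlph)))).1
    = acc ++ pvSpecRun kwl j cs := by
  induction cs generalizing acc j with
  | nil => simp [pvSpecRun]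
  | cons ch cs ih =>
    by_cases h : ch ∈ pvAlph
    · simp only [List.filter_cons, h, decide_true, if_true, pvDecFrom, List.foldl_cons,
        List.headD_cons, List.tail_cons, pvSpecRun]
      rw [ih]
      simp
    · simp only [List.filter_cons, h, decide_false, List.foldl_cons, pvSpecRun,
        Bool.false_eq_true, if_false]
      rw [ih]
      simp

-- ===== VERDICT (by name: the statement is the Claim_ definition above) =====
theorem decrypt_with_keyword_spec : Claim_equal_decrypt_with_keyword := by
  intro ct kw _ _
  unfold Spec_decrypt_with_keyword decrypt_with_keyword decrypt_with_keyword_alt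
  simp only []
  rw [pvA_run]
  have h0 : (0 : Int) = ((0 : Nat) : Int) := rfl
  rw [h0, pvB_map, pvB_run]
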